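-- pv_equiv track=rewrite | github.com/JitakshKapoor/Information-Hiding-using-Cryptography-and-Audio-Steganography | Vigenere_Encrypt.py | createEncMatrix
-- ===== SOURCE A (Python) =====
-- def createEncMatrix(width, Final_cipher_Text):
--   r = 0
--   c = 0
--   matrix = [[]]
--   for pos, ch in enumerate(Final_cipher_Text):
--     matrix[r].append(ch)
--     c += 1
--     if c >= width:
--       c = 0
--       r += 1
--       matrix.append([])
--
--   return matrix
-- ===== SOURCE B (Python) =====
-- def createEncMatrix(width, Final_cipher_Text):
--     rows = []
--     i = 0
--     while i + width <= len(Final_cipher_Text):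
--         rows.append(list(Final_cipher_Text[i:i + width]))
--         i += width
--     rows.append(list(Final_cipher_Text[i:]))
--     return rows
-- ===== Notes on version B (the rewrite author's own statement) =====
-- stated objective: simpler
-- what changed: B peels off width-sized chunks by slicing at chunk-start indices and appends the (possibly empty) remainder as the last row, instead of A's char-by-char loop with row/column counters mutating matrix[r] (whole-chunk slicing does the copying in C rather than one Python-level append per character); Pre_ restricts to the natural domain width >= 1, since for width <= 0 B's chunk loop never terminates (the index never advances past the end).
-- outside the precondition, e.g. on createEncMatrix(0, 'ab'): A returns [['a'], ['b'], []], B does not finish within the time limit; on createEncMatrix(-1, 'ab'): A returns [['a'], ['b'], []], B does not finish within the time limit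
import Mathlib
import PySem

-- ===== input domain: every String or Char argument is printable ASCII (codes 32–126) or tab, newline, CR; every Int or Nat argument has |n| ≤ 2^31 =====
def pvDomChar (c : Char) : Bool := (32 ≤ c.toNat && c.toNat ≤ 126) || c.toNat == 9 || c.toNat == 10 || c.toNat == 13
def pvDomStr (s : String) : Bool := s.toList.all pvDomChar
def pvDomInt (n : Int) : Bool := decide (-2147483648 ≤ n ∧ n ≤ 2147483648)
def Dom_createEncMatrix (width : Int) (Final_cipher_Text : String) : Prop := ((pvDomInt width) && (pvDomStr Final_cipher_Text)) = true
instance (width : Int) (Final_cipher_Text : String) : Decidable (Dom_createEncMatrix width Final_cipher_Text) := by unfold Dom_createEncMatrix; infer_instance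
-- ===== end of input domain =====

-- B peels off width-sized chunks by slicing at chunk-start indices and appends the
-- (possibly empty) remainder as the last row, instead of A's char-by-char loop with
-- row/column counters (objective: simpler; measured faster by whole-chunk slicing).

-- ===== PORT A =====
-- state is (r, c, matrix); Python's matrix[r].append(ch) is List.modify at index r
def createEncMatrix (width : Int) (Final_cipher_Text : String) : List (List String) :=
  let res := Final_cipher_Text.toList.foldl
    (fun (st : Nat × Int × List (List String)) ch =>
      let m := st.2.2.modify st.1 (fun row => row ++ [ch.toString])
      let c := st.2.1 + 1
      if width ≤ c then (st.1 + 1, 0, m ++ [[]]) else (st.1, c, m))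
    (0, 0, [[]])
  res.2.2

-- ===== PORT B =====
-- B's while loop `while i + width <= len: append(s[i:i+width]); i += width` followed by the
-- remainder row `append(s[i:])`; fuel (length + 1 at the call) only makes the recursion total
def altRows (width : Int) (cs : List Char) : Nat → Nat → List (List String)
  | _, 0 => []
  | i, fuel + 1 =>
      if (i : Int) + width ≤ (cs.length : Int) then
        ((PySem.List.slice cs (some (i : Int)) (some ((i : Int) + width))).map Char.toString)
          :: altRows width cs (i + width.toNat) fuel
      else
        [(PySem.List.slice cs (some (i : Int)) none).map Char.toString]

def createEncMatrix_alt (width : Int) (Final_cipher_Text : String) : List (List String) :=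
  altRows width Final_cipher_Text.toList 0 (Final_cipher_Text.toList.length + 1)

-- ===== PRECONDITION & SPEC =====
-- Pre_ restricts to the natural domain width ≥ 1: for width ≤ 0 B's chunk loop never
-- terminates (i never advances past the end), while A's one-char-per-row output there is an
-- accident of its `c >= width` counter test.
def Pre_createEncMatrix (width : Int) (Final_cipher_Text : String) : Prop := 1 ≤ width
instance (width : Int) (Final_cipher_Text : String) : Decidable (Pre_createEncMatrix width Final_cipher_Text) := by unfold Pre_createEncMatrix; infer_instance
def pvWitness_createEncMatrix : Int × String := (2, "abcde")
def Spec_createEncMatrix (width : Int) (Final_cipher_Text : String) (out : List (List String)) : Prop := out = createEncMatrix_alt width Final_cipher_Text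
instance (width : Int) (Final_cipher_Text : String) (out : List (List String)) : Decidable (Spec_createEncMatrix width Final_cipher_Text out) := by unfold Spec_createEncMatrix; infer_instance

-- ===== CLAIM (what is proved, stated in full; the proofs are below) =====
def Claim_equal_createEncMatrix : Prop := ∀ (width : Int) (Final_cipher_Text : String), Dom_createEncMatrix width Final_cipher_Text → Pre_createEncMatrix width Final_cipher_Text → Spec_createEncMatrix width Final_cipher_Text (createEncMatrix width Final_cipher_Text)

-- ===== LEMMAS AND PROOFS =====

-- common reference shape both ports are reduced to: `cur` is the current partial row
def chunksAux (w : Nat) (cur : List String) : List Char → List (List String)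
  | [] => [cur]
  | ch :: rest =>
      if w ≤ cur.length + 1 then (cur ++ [ch.toString]) :: chunksAux w [] rest
      else chunksAux w (cur ++ [ch.toString]) rest

theorem modify_append_last {α : Type} (pref : List α) (cur : α) (f : α → α) :
    (pref ++ [cur]).modify pref.length f = pref ++ [f cur] := by
  rw [List.modify_eq_take_cons_drop (by simp)]
  simp

theorem foldlA_eq_chunksAux (width : Int) (hw : 1 ≤ width) (cs : List Char)
    (pref : List (List String)) (cur : List String) (hc : (cur.length : Int) < width) :
    (List.foldl
      (fun (st : Nat × Int × List (List String)) ch =>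
        let m := st.2.2.modify st.1 (fun row => row ++ [ch.toString])
        let c := st.2.1 + 1
        if width ≤ c then (st.1 + 1, 0, m ++ [[]]) else (st.1, c, m))
      (pref.length, (cur.length : Int), pref ++ [cur]) cs).2.2
    = pref ++ chunksAux width.toNat cur cs := by
  induction cs generalizing pref cur with
  | nil => simp [chunksAux]
  | cons ch rest ih =>
    simp only [List.foldl_cons, modify_append_last]
    by_cases h : width ≤ (cur.length : Int) + 1
    · have hcond : width.toNat ≤ cur.length + 1 := by omega
      rw [if_pos h]
      simp only [chunksAux, if_pos hcond]
      have h' := ih (pref ++ [cur ++ [ch.toString]]) [] (by simpa using hw)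
      simp only [List.length_append, List.length_cons, List.length_nil, Nat.cast_zero,
        List.append_assoc, List.cons_append, List.nil_append] at h' ⊢
      exact h'
    · have hcond : ¬ width.toNat ≤ cur.length + 1 := by omega
      rw [if_neg h]
      simp only [chunksAux, if_neg hcond]
      have h' := ih pref (cur ++ [ch.toString]) (by simp; omega)
      simp only [List.length_append, List.length_cons, List.length_nil, Nat.cast_add,
        Nat.cast_one, Nat.cast_zero] at h'
      exact h'

theorem A_eq_chunksAux (width : Int) (hw : 1 ≤ width) (t : String) :
    createEncMatrix width t = chunksAux width.toNat [] t.toList := by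
  have h := foldlA_eq_chunksAux width hw t.toList [] [] (by simpa using hw)
  simp only [List.length_nil, Nat.cast_zero, List.nil_append] at h
  simpa [createEncMatrix] using h

theorem chunksAux_short (w : Nat) (cs : List Char) (cur : List String)
    (h : cur.length + cs.length < w) :
    chunksAux w cur cs = [cur ++ cs.map Char.toString] := by
  induction cs generalizing cur with
  | nil => simp [chunksAux]
  | cons ch rest ih =>
    simp only [chunksAux]
    rw [if_neg (by simp at h; omega), ih _ (by simp at h ⊢; omega)]
    simp

theorem chunksAux_full (w : Nat) (cs : List Char) (cur : List String)
    (hlt : cur.length < w) (hge : w ≤ cur.length + cs.length) :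
    chunksAux w cur cs
      = (cur ++ (cs.take (w - cur.length)).map Char.toString)
        :: chunksAux w [] (cs.drop (w - cur.length)) := by
  induction cs generalizing cur with
  | nil => simp at hge; omega
  | cons ch rest ih =>
    simp only [chunksAux]
    by_cases h : w ≤ cur.length + 1
    · have hw1 : w - cur.length = 1 := by omega
      rw [if_pos h, hw1]
      simp
    · rw [if_neg h, ih _ (by simp; omega) (by simp at hge ⊢; omega)]
      have hw1 : w - cur.length = (w - (cur ++ [ch.toString]).length) + 1 := by
        simp; omega
      rw [hw1]
      simp

theorem altRows_eq_chunksAux (width : Int) (hw : 1 ≤ width) (cs : List Char) :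
    ∀ (fuel i : Nat), i ≤ cs.length → cs.length - i < fuel →
    altRows width cs i fuel = chunksAux width.toNat [] (cs.drop i) := by
  intro fuel
  induction fuel with
  | zero => intro i _ hf; omega
  | succ fuel ih =>
    intro i hi hf
    simp only [altRows]
    by_cases h : (i : Int) + width ≤ (cs.length : Int)
    · rw [if_pos h]
      have hslice : PySem.List.slice cs (some (i : Int)) (some ((i : Int) + width))
          = (cs.drop i).take width.toNat := by
        rw [PySem.List.slice_toNat cs (by omega) (by omega), Int.toNat_natCast]
        congr 1
        omega
      have hfull := chunksAux_full width.toNat (cs.drop i) []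
        (by simp; omega) (by simp; omega)
      simp only [List.length_nil, Nat.sub_zero, List.nil_append] at hfull
      rw [hfull, hslice, List.drop_drop, ih (i + width.toNat) (by omega) (by omega)]
    · rw [if_neg h]
      have hslice : PySem.List.slice cs (some (i : Int)) none = cs.drop i := by
        rw [PySem.List.slice_from cs (Int.natCast_nonneg i), Int.toNat_natCast]
      have hshort := chunksAux_short width.toNat (cs.drop i) [] (by simp; omega)
      rw [hshort, hslice]
      simp

-- ===== VERDICT (by name: the statement is the Claim_ definition above) =====
theorem createEncMatrix_spec : Claim_equal_createEncMatrix := by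
  intro width t _ hw
  unfold Spec_createEncMatrix
  rw [A_eq_chunksAux width hw t]
  unfold createEncMatrix_alt
  rw [altRows_eq_chunksAux width hw t.toList (t.toList.length + 1) 0 (by omega) (by omega)]
  simp
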